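-- pv_equiv track=rewrite | github.com/mlabeeb03/codeforces | Yet Another Tournament.py | calc
-- ===== SOURCE A (Python) =====
-- def calc(a,b,n,m,mid):
--   res=0
--   if mid!=n-1:
--     for i in range(mid+1):
--       res+=b[i]
--     if res<=m:
--       return True
--   res=a[mid]
--   flag=False
--   cnt=0
--   now=0
--   while cnt<mid-1:
--     if flag==False and b[now]==a[mid]:
--       flag=True
--       now+=1
--     else:
--       res+=b[now]
--       cnt+=1
--       now+=1
--   return res<=m
-- ===== SOURCE B (Python) =====
-- def calc(a, b, n, m, mid):
--     # Part 1: if we are not forced to meet the rival, just beat the first mid+1 opponents.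
--     if mid != n - 1 and sum(b[: max(mid + 1, 0)]) <= m:
--         return True
--     # Part 2: pay a[mid], then the cheapest-by-position remaining opponents:
--     # drop the first occurrence of a[mid] from a copy of b, then sum the prefix.
--     bb = list(b)
--     if a[mid] in bb:
--         bb.remove(a[mid])
--     return a[mid] + sum(bb[: max(mid - 1, 0)]) <= m
-- ===== Notes on version B (the rewrite author's own statement) =====
-- stated objective: simpler
-- what changed: Part 2's flag/counter while-loop that interleaves skipping one copy of a[mid] with summing b is replaced by copy-remove-slice-sum: remove the first occurrence of a[mid] from a copy of b, then sum a prefix slice; part 1 becomes a single sum over a slice.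
import Mathlib
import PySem

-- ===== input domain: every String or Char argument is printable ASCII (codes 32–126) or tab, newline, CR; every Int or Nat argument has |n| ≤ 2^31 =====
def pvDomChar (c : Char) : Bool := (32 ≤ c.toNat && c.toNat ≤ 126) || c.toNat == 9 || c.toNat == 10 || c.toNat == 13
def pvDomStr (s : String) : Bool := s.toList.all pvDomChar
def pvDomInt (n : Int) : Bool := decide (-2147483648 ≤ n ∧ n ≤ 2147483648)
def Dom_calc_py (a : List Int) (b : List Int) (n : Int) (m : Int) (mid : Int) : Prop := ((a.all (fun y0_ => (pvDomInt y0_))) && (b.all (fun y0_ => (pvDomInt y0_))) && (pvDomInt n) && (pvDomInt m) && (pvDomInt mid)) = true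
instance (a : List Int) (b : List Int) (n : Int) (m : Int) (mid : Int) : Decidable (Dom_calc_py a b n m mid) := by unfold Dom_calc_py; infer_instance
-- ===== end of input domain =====

-- B separates the "skip one copy of a[mid]" step (copy + remove first occurrence) from the
-- summation (slice + sum) instead of interleaving them with a flag/counter while-loop; objective: simpler.

-- ===== PORT A =====
-- A's while-loop, state (res, flag, cnt, now); `none` = IndexError on b[now]
def calcLoopA (b : List Int) (am : Int) (tgt : Int) (res : Int) (flag : Bool) (cnt : Int) (now : Int) : Option Int :=
  if h : cnt < tgt then
    match PySem.List.pyGet? b now with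
    | none => none
    | some bv =>
      if h2 : flag = false ∧ bv = am then
        calcLoopA b am tgt res true cnt (now + 1)
      else
        calcLoopA b am tgt (res + bv) flag (cnt + 1) (now + 1)
  else
    some res
termination_by ((tgt - cnt).toNat, if flag then 0 else 1)
decreasing_by
  · simp only [h2.1]
    exact Prod.Lex.right _ (by decide)
  · exact Prod.Lex.left _ _ (by omega)

def calc_py (a : List Int) (b : List Int) (n : Int) (m : Int) (mid : Int) : Bool :=
  -- `for i in range(mid+1): res += b[i]` ; `none` = IndexError on b[i], excluded by Pre_
  let part1 : Option Int :=
    (PySem.List.pyRange 0 (mid + 1) 1).foldl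
      (fun acc i => acc.bind (fun r => (PySem.List.pyGet? b i).map (fun v => r + v))) (some 0)
  let part2 : Bool :=
    match PySem.List.pyGet? a mid with
    | none => false   -- IndexError on a[mid]; excluded by Pre_
    | some am =>
      match calcLoopA b am (mid - 1) am false 0 0 with
      | none => false -- IndexError on b[now]; excluded by Pre_
      | some res => decide (res ≤ m)
  if mid ≠ n - 1 then
    match part1 with
    | none => false   -- IndexError on b[i]; excluded by Pre_
    | some res => if res ≤ m then true else part2
  else part2

-- ===== PORT B =====
def calc_py_alt (a : List Int) (b : List Int) (n : Int) (m : Int) (mid : Int) : Bool :=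
  if mid ≠ n - 1 ∧ (PySem.List.slice b none (some (max (mid + 1) 0))).sum ≤ m then
    true
  else
    match PySem.List.pyGet? a mid with
    | none => false   -- IndexError on a[mid]; excluded by Pre_
    | some am =>
      let bb := if am ∈ b then (PySem.List.remove? b am).getD b else b
      decide (am + (PySem.List.slice bb none (some (max (mid - 1) 0))).sum ≤ m)

-- ===== PRECONDITION & SPEC =====
-- Pre_ is exactly where A returns (everywhere else A raises IndexError): either mid is a valid
-- (possibly negative, Python-style) index into a and b is long enough for every b-index A reads
-- (mid+1 entries in part 1 when mid ≠ n-1; mid resp. mid-1 entries in the while-loop when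
-- mid = n-1, depending on whether a[mid] occurs among the first mid-1 entries of b and is skipped),
-- or part 1 already returns True (mid ≠ n-1, its mid+1 reads are in range and their sum is ≤ m)
-- before a[mid] is ever evaluated.
def Pre_calc_py (a : List Int) (b : List Int) (n : Int) (m : Int) (mid : Int) : Prop :=
  (-(a.length : Int) ≤ mid ∧ mid < (a.length : Int) ∧
   (0 ≤ mid →
     (if mid ≠ n - 1 then mid + 1 ≤ (b.length : Int)
      else if ((PySem.List.pyGet? a mid).getD 0) ∈ b.take (mid - 1).toNat then mid ≤ (b.length : Int)
      else mid - 1 ≤ (b.length : Int))))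
  ∨ (mid ≠ n - 1 ∧ mid + 1 ≤ (b.length : Int) ∧ (b.take (mid + 1).toNat).sum ≤ m)
instance (a : List Int) (b : List Int) (n : Int) (m : Int) (mid : Int) : Decidable (Pre_calc_py a b n m mid) := by unfold Pre_calc_py; infer_instance

def pvWitness_calc_py : List Int × List Int × Int × Int × Int := ([5], [3], 2, 4, 0)

def Spec_calc_py (a : List Int) (b : List Int) (n : Int) (m : Int) (mid : Int) (out : Bool) : Prop := out = calc_py_alt a b n m mid
instance (a : List Int) (b : List Int) (n : Int) (m : Int) (mid : Int) (out : Bool) : Decidable (Spec_calc_py a b n m mid out) := by unfold Spec_calc_py; infer_instance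

-- ===== CLAIM (what is proved, stated in full; the proofs are below) =====
def Claim_equal_calc_py : Prop := ∀ (a : List Int) (b : List Int) (n : Int) (m : Int) (mid : Int), Dom_calc_py a b n m mid → Pre_calc_py a b n m mid → Spec_calc_py a b n m mid (calc_py a b n m mid)

-- ===== LEMMAS AND PROOFS =====

-- erasing a first occurrence that lies inside the first d elements commutes with taking a prefix
theorem take_erase_of_mem {x : Int} (l : List Int) (d : Nat) (h : x ∈ l.take d) :
    (l.erase x).take d = (l.take (d + 1)).erase x := by
  induction l generalizing d with
  | nil => simp at h
  | cons y t ih =>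
    cases d with
    | zero => simp at h
    | succ d' =>
      by_cases hy : y = x
      · subst hy; simp
      · rw [List.take_succ_cons] at h
        rcases List.mem_cons.mp h with h1 | h1
        · exact absurd h1.symm hy
        · rw [List.erase_cons_tail (by simp [hy]), List.take_succ_cons,
              List.take_succ_cons, List.erase_cons_tail (by simp [hy]), ih d' h1]

theorem take_erase_of_not_mem {x : Int} (l : List Int) (d : Nat) (h : x ∉ l.take d) :
    (l.erase x).take d = l.take d := by
  induction l generalizing d with
  | nil => simp
  | cons y t ih =>
    cases d with
    | zero => simp
    | succ d' =>
      by_cases hy : y = x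
      · exact absurd (by simp [hy]) h
      · rw [List.erase_cons_tail (by simp [hy]), List.take_succ_cons, List.take_succ_cons,
            ih d' (fun hm => h (by rw [List.take_succ_cons]; exact List.mem_cons_of_mem _ hm))]

-- Part 1's index loop sums the first k elements of b.
theorem part1_fold (b : List Int) (k : Nat) (hk : k ≤ b.length) :
    (PySem.List.pyRange 0 (k : Int) 1).foldl
      (fun acc i => acc.bind (fun r => (PySem.List.pyGet? b i).map (fun v => r + v))) (some 0)
      = some ((b.take k).sum) := by
  induction k with
  | zero => simp
  | succ k' ih =>
    have hk' : k' < b.length := by omega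
    rw [show ((k' + 1 : Nat) : Int) = (k' : Int) + 1 by push_cast; ring,
        PySem.List.pyRange_one_succ_right (by positivity), List.foldl_append,
        ih (by omega)]
    simp only [List.foldl_cons, List.foldl_nil, Option.bind_some,
      PySem.List.pyGet?_natCast, List.getElem?_eq_getElem hk', Option.map_some,
      List.take_add_one, List.sum_append]
    simp

-- The while-loop with flag already set adds the next d elements of b.
theorem loopA_flag_true (d : Nat) (b : List Int) (am tgt res cnt now : Int)
    (hnow : 0 ≤ now) (hd : (tgt - cnt).toNat = d) (hlen : now.toNat + d ≤ b.length) :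
    calcLoopA b am tgt res true cnt now = some (res + ((b.drop now.toNat).take d).sum) := by
  induction d generalizing res cnt now with
  | zero =>
    rw [calcLoopA, dif_neg (by omega)]
    simp
  | succ d' ih =>
    have hlt : now.toNat < b.length := by omega
    have hget : PySem.List.pyGet? b now = some (b[now.toNat]'hlt) :=
      PySem.List.pyGet?_eq_some_getElem b hnow (by omega)
    rw [calcLoopA, dif_pos (by omega), hget]
    simp only [Bool.true_eq_false, false_and, dif_neg, not_false_iff]
    rw [ih (res + b[now.toNat]) (cnt + 1) (now + 1) (by omega) (by omega) (by omega)]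
    rw [show (now + 1).toNat = now.toNat + 1 by omega,
        List.drop_eq_getElem_cons hlt, List.take_succ_cons]
    simp [add_assoc]

-- flag=false and am does not occur among the next d elements: no skip happens.
theorem loopA_no_skip (d : Nat) (b : List Int) (am tgt res cnt now : Int)
    (hnow : 0 ≤ now) (hd : (tgt - cnt).toNat = d) (hlen : now.toNat + d ≤ b.length)
    (hmem : am ∉ (b.drop now.toNat).take d) :
    calcLoopA b am tgt res false cnt now = some (res + ((b.drop now.toNat).take d).sum) := by
  induction d generalizing res cnt now with
  | zero =>
    rw [calcLoopA, dif_neg (by omega)]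
    simp
  | succ d' ih =>
    have hlt : now.toNat < b.length := by omega
    have hget : PySem.List.pyGet? b now = some (b[now.toNat]'hlt) :=
      PySem.List.pyGet?_eq_some_getElem b hnow (by omega)
    have hdrop : b.drop now.toNat = b[now.toNat] :: b.drop (now.toNat + 1) :=
      List.drop_eq_getElem_cons hlt
    rw [hdrop, List.take_succ_cons] at hmem
    have hne : b[now.toNat] ≠ am := fun h => hmem (by rw [h]; exact List.mem_cons_self)
    rw [calcLoopA, dif_pos (by omega), hget]
    dsimp only
    rw [dif_neg (by simp [hne])]
    rw [ih (res + b[now.toNat]) (cnt + 1) (now + 1) (by omega) (by omega) (by omega)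
        (by rw [show (now + 1).toNat = now.toNat + 1 by omega]
            exact fun h => hmem (List.mem_cons_of_mem _ h))]
    rw [show (now + 1).toNat = now.toNat + 1 by omega, hdrop, List.take_succ_cons]
    simp [add_assoc]

-- flag=false and am occurs among the next d elements: exactly one copy of am is skipped,
-- so d+1 elements are scanned and the first occurrence of am is erased from the scanned prefix.
theorem loopA_skip (d : Nat) (b : List Int) (am tgt res cnt now : Int)
    (hnow : 0 ≤ now) (hd : (tgt - cnt).toNat = d) (hlen : now.toNat + d + 1 ≤ b.length)
    (hmem : am ∈ (b.drop now.toNat).take d) :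
    calcLoopA b am tgt res false cnt now
      = some (res + (((b.drop now.toNat).take (d + 1)).erase am).sum) := by
  induction d generalizing res cnt now with
  | zero => simp at hmem
  | succ d' ih =>
    have hlt : now.toNat < b.length := by omega
    have hget : PySem.List.pyGet? b now = some (b[now.toNat]'hlt) :=
      PySem.List.pyGet?_eq_some_getElem b hnow (by omega)
    have hdrop : b.drop now.toNat = b[now.toNat] :: b.drop (now.toNat + 1) :=
      List.drop_eq_getElem_cons hlt
    have hdrop1 : (b.drop (now.toNat + 1)) = (b.drop ((now + 1).toNat)) := by
      rw [show (now + 1).toNat = now.toNat + 1 by omega]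
    rw [calcLoopA, dif_pos (by omega), hget]
    dsimp only
    by_cases heq : b[now.toNat] = am
    · rw [dif_pos ⟨rfl, heq⟩]
      rw [loopA_flag_true (d' + 1) b am tgt res cnt (now + 1) (by omega) (by omega) (by omega)]
      rw [hdrop, List.take_succ_cons, heq, List.erase_cons_head, hdrop1]
    · rw [dif_neg (by simp [heq])]
      rw [hdrop, List.take_succ_cons] at hmem
      have hmem' : am ∈ (b.drop ((now + 1).toNat)).take d' := by
        rw [← hdrop1]
        rcases List.mem_cons.mp hmem with h | h
        · exact absurd h.symm heq
        · exact h
      rw [ih (res + b[now.toNat]) (cnt + 1) (now + 1) (by omega) (by omega) (by omega) hmem']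
      rw [hdrop, List.take_succ_cons, List.erase_cons_tail (by simp [heq]), hdrop1]
      simp [add_assoc]

-- Part 2 of A (pay a[mid], skip one copy of it while adding mid-1 entries of b)
-- equals B's copy-remove-slice-sum computation.
theorem part2_eq (b : List Int) (am m mid : Int) (h0 : 0 ≤ mid)
    (hlen : (if am ∈ b.take (mid - 1).toNat then mid else mid - 1) ≤ (b.length : Int)) :
    (match calcLoopA b am (mid - 1) am false 0 0 with
     | none => false
     | some res => decide (res ≤ m))
    = decide (am + (PySem.List.slice
        (if am ∈ b then (PySem.List.remove? b am).getD b else b)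
        none (some (max (mid - 1) 0))).sum ≤ m) := by
  have hsl : ∀ l : List Int, PySem.List.slice l none (some (max (mid - 1) 0))
      = l.take (mid - 1).toNat := by
    intro l
    rw [PySem.List.slice_to l (le_max_right _ _)]
    congr 1
    omega
  set d := (mid - 1).toNat with hdd
  by_cases hm : am ∈ b.take d
  · have hmb : am ∈ b := List.mem_of_mem_take hm
    have hd1 : 1 ≤ d := by
      rcases Nat.eq_zero_or_pos d with h | h
      · rw [h] at hm; simp at hm
      · omega
    rw [if_pos hm] at hlen
    rw [loopA_skip d b am (mid - 1) am 0 0 (by omega) (by omega) (by omega) (by simpa using hm)]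
    rw [if_pos hmb, PySem.List.remove?_eq_some_erase b am hmb, Option.getD_some, hsl,
        take_erase_of_mem b d hm]
    simp
  · rw [if_neg hm] at hlen
    rw [loopA_no_skip d b am (mid - 1) am 0 0 (by omega) (by omega) (by omega) (by simpa using hm)]
    by_cases hmb : am ∈ b
    · rw [if_pos hmb, PySem.List.remove?_eq_some_erase b am hmb, Option.getD_some, hsl,
          take_erase_of_not_mem b d hm]
      simp
    · rw [if_neg hmb, hsl]
      simp

-- ===== VERDICT (by name: the statement is the Claim_ definition above) =====
-- part 1 of A as a prefix sum, for any mid with mid+1 readable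
theorem part1_eval (b : List Int) (mid : Int) (hlen : mid + 1 ≤ (b.length : Int)) :
    (PySem.List.pyRange 0 (mid + 1) 1).foldl
      (fun acc i => acc.bind (fun r => (PySem.List.pyGet? b i).map (fun v => r + v))) (some 0)
      = some ((b.take (mid + 1).toNat).sum) := by
  by_cases h : 0 ≤ mid + 1
  · rw [show mid + 1 = (((mid + 1).toNat : Nat) : Int) by omega]
    exact part1_fold b (mid + 1).toNat (by omega)
  · rw [PySem.List.pyRange_one_eq_nil (by omega), List.foldl_nil,
        show (mid + 1).toNat = 0 by omega]
    simp

theorem calc_py_spec : Claim_equal_calc_py := by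
  intro a b n m mid _ hpre
  rcases hpre with ⟨hlo, hla, hb'⟩ | ⟨hn, hblen, hsum⟩
  case inr =>
    -- part 1 already returns True on both sides
    unfold Spec_calc_py calc_py calc_py_alt
    dsimp only
    rw [if_pos hn, part1_eval b mid hblen]
    dsimp only
    rw [if_pos hsum,
        if_pos ⟨hn, by rw [PySem.List.slice_to b (le_max_right _ _),
                           show (max (mid + 1) 0).toNat = (mid + 1).toNat by omega]
                       exact hsum⟩]
  by_cases h0 : 0 ≤ mid
  case neg =>
    -- mid < 0: part 1 sums nothing, the while-loop never runs; both sides read only a[mid]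
    have hneg : mid < 0 := by omega
    obtain ⟨v, hget⟩ : ∃ v, PySem.List.pyGet? a mid = some v := by
      cases hg : PySem.List.pyGet? a mid with
      | none =>
        rw [PySem.List.pyGet?_eq_none_iff] at hg
        exact absurd ⟨hlo, hla⟩ hg
      | some v => exact ⟨v, rfl⟩
    unfold Spec_calc_py calc_py calc_py_alt
    dsimp only
    rw [PySem.List.pyRange_one_eq_nil (by omega), List.foldl_nil, hget]
    dsimp only
    rw [calcLoopA, dif_neg (by omega),
        show max (mid + 1) 0 = 0 by omega, show max (mid - 1) 0 = 0 by omega,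
        PySem.List.slice_to b le_rfl,
        PySem.List.slice_to _ le_rfl]
    simp only [Int.toNat_zero, List.take_zero, List.sum_nil, add_zero]
    by_cases hn : mid = n - 1
    · simp [hn]
    · rw [if_pos hn]
      by_cases hm : (0 : Int) ≤ m
      · rw [if_pos hm, if_pos ⟨hn, hm⟩]
      · rw [if_neg hm, if_neg (fun h => hm h.2)]
  obtain hb := hb' h0
  have hlt : mid.toNat < a.length := by omega
  have hgetA : PySem.List.pyGet? a mid = some (a[mid.toNat]'hlt) :=
    PySem.List.pyGet?_eq_some_getElem a h0 (by omega)
  rw [hgetA] at hb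
  unfold Spec_calc_py calc_py calc_py_alt
  dsimp only
  have hmax1 : max (mid + 1) 0 = mid + 1 := by omega
  rw [hmax1]
  by_cases hn : mid = n - 1
  · rw [if_neg (by simp [hn]), if_neg (by simp [hn]), hgetA]
    dsimp only [Option.getD_some] at hb ⊢
    exact part2_eq b _ m mid h0 (by split_ifs at hb ⊢ <;> simp_all)
  · rw [if_pos hn] at hb ⊢
    have hcast : mid + 1 = (((mid + 1).toNat : Nat) : Int) := by omega
    rw [hcast, part1_fold b (mid + 1).toNat (by omega),
        PySem.List.slice_to b (by positivity)]
    simp only [Int.toNat_natCast]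
    by_cases hsum : (b.take (mid + 1).toNat).sum ≤ m
    · rw [if_pos hsum, if_pos ⟨hn, hsum⟩]
    · rw [if_neg hsum, if_neg (by intro h; exact hsum h.2), hgetA]
      dsimp only
      exact part2_eq b _ m mid h0 (by split_ifs <;> omega)
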